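-- pv_equiv track=rewrite | github.com/othmanegf/hangman-game | Game Algorithm.py | valid_word
-- ===== SOURCE A (Python) =====
-- def valid_word(word):
--     a = 0
--     b = 0
--     for i in range(len(word)):
--         if 65 <= ord(word[i]) <= 90:
--             a += 1
--         else:
--             b += 1
--     if 4 <= len(word) <= 25:
--         c = True
--     else:
--         c = False
--     if a == len(word) and b == 0 and c:
--         return True
--     else:
--         return False
-- ===== SOURCE B (Python) =====
-- import re
--
-- def valid_word(word):
--     return bool(re.fullmatch(r'[A-Z]{4,25}', word))
-- ===== Notes on version B (the rewrite author's own statement) =====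
-- stated objective: idiomatic
-- what changed: Replaces A's explicit character loop with twin counters plus a separate length test by a single regex fullmatch r'[A-Z]{4,25}' expressing both the all-uppercase-ASCII check and the 4-25 length bound.
import Mathlib
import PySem

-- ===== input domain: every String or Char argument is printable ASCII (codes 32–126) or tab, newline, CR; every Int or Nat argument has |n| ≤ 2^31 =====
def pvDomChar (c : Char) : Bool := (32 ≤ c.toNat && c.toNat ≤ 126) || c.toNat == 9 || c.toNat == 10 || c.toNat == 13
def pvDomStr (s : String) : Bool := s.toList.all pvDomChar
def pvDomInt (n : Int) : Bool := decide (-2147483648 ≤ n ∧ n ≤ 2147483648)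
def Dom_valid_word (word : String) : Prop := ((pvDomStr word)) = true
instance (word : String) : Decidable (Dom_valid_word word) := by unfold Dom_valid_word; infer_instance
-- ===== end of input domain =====

-- B replaces A's twin-counter loop and separate length test by one regex fullmatch r'[A-Z]{4,25}' (idiomatic).


-- ===== PORT A =====
-- the loop 'for i in range(len(word))' over ord(word[i]), counters a and b
def valid_word_step (p : Int × Int) (c : Char) : Int × Int :=
  if 65 ≤ c.toNat ∧ c.toNat ≤ 90 then (p.1 + 1, p.2) else (p.1, p.2 + 1)

def valid_word (word : String) : Bool :=
  let cs := word.toList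
  let ab := cs.foldl valid_word_step (0, 0)
  let c : Bool := if 4 ≤ cs.length ∧ cs.length ≤ 25 then true else false
  if ab.1 = (cs.length : Int) ∧ ab.2 = 0 ∧ c = true then true else false

-- ===== PORT B =====
-- re.fullmatch(r'[A-Z]{4,25}', word): 4 to 25 characters, each in 'A'..'Z'
def valid_word_alt (word : String) : Bool :=
  let cs := word.toList
  decide (4 ≤ cs.length) && decide (cs.length ≤ 25) && cs.all (fun c => ('A' ≤ c) && (c ≤ 'Z'))

-- ===== PRECONDITION & SPEC =====
def Spec_valid_word (word : String) (out : Bool) : Prop := out = valid_word_alt word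
instance (word : String) (out : Bool) : Decidable (Spec_valid_word word out) := by unfold Spec_valid_word; infer_instance

-- ===== CLAIM (what is proved, stated in full; the proofs are below) =====
def Claim_equal_valid_word : Prop := ∀ (word : String), Dom_valid_word word → Spec_valid_word word (valid_word word)

-- ===== LEMMAS AND PROOFS =====
def vwP (c : Char) : Bool := decide (65 ≤ c.toNat ∧ c.toNat ≤ 90)

theorem valid_word_fold_eq (cs : List Char) (a b : Int) :
    cs.foldl valid_word_step (a, b) =
      (a + (cs.countP vwP : Int), b + ((cs.countP (fun c => !vwP c)) : Int)) := by
  induction cs generalizing a b with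
  | nil => simp
  | cons c cs ih =>
      simp only [List.foldl_cons, valid_word_step, List.countP_cons, ih]
      by_cases h : 65 ≤ c.toNat ∧ c.toNat ≤ 90 <;>
        simp [vwP, h, Prod.ext_iff] <;> ring

theorem vwP_eq (c : Char) : vwP c = (decide ('A' ≤ c) && decide (c ≤ 'Z')) := by
  have h1 : ('A' ≤ c) ↔ 65 ≤ c.toNat := by
    rw [Char.le_def, UInt32.le_iff_toNat_le]; rfl
  have h2 : (c ≤ 'Z') ↔ c.toNat ≤ 90 := by
    rw [Char.le_def, UInt32.le_iff_toNat_le]; exact Iff.rfl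
  simp [vwP, h1, h2]

-- ===== VERDICT (by name: the statement is the Claim_ definition above) =====
theorem valid_word_spec : Claim_equal_valid_word := by
  intro word _
  unfold Spec_valid_word valid_word valid_word_alt
  simp only [valid_word_fold_eq, zero_add]
  have hall : (word.toList.all fun c => decide ('A' ≤ c) && decide (c ≤ 'Z'))
      = word.toList.all vwP := by
    simp only [← vwP_eq]
  by_cases ha : word.toList.all vwP = true
  · have hmem := List.all_eq_true.mp ha
    have h1 : word.toList.countP vwP = word.toList.length :=
      List.countP_eq_length.mpr hmem
    have h2 : word.toList.countP (fun c => !vwP c) = 0 := by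
      rw [List.countP_eq_zero]; intro c hc; simp [hmem c hc]
    by_cases h4 : 4 ≤ word.toList.length <;> by_cases h25 : word.toList.length ≤ 25 <;>
      simp_all
  · have h2 : word.toList.countP (fun c => !vwP c) ≠ 0 := by
      intro h0
      apply ha
      rw [List.all_eq_true]
      intro c hc
      have := (List.countP_eq_zero.mp h0) c hc
      simpa using this
    have hcnt : ((word.toList.countP (fun c => !vwP c)) : Int) ≠ 0 :=
      Nat.cast_ne_zero.mpr h2
    rw [if_neg (fun hc => hcnt hc.2.1)]
    have hf : word.toList.all vwP = false := eq_false_of_ne_true ha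
    simp [hall, hf]
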